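-- pv_equiv track=rewrite | github.com/mgtezak/Advent-of-Code-Puzzle-Solver | my_functions/solutions/aoc2020.py | aoc2020_day3_part2
-- ===== SOURCE A (Python) =====
-- def aoc2020_day3_part2(puzzle_input):
--
--     def count_trees(right=3, down=1):
--         tree_count = 0
--         j = 0
--         l = len(slope[0])
--         for i, row in enumerate(slope):
--             if down == 2 and i%2:
--                 continue
--             if row[j] == '#':
--                 tree_count += 1
--             j = (j + right) % l
--         return tree_count
--
--     slope = puzzle_input.split('\n')
--     instructions = [(1, 1), (3, 1), (5, 1), (7, 1), (1, 2)]
--     mul = 1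
--     for right, down in instructions:
--         mul *= count_trees(right, down)
--     return mul
-- ===== SOURCE B (Python) =====
-- def aoc2020_day3_part2(puzzle_input):
--     slope = puzzle_input.split('\n')
--     width = len(slope[0])
--     # one fused pass over the rows, maintaining all five (count, column) states at once
--     c1 = c3 = c5 = c7 = cd = 0
--     j1 = j3 = j5 = j7 = jd = 0
--     for i, row in enumerate(slope):
--         c1 += row[j1] == '#'; j1 = (j1 + 1) % width
--         c3 += row[j3] == '#'; j3 = (j3 + 3) % width
--         c5 += row[j5] == '#'; j5 = (j5 + 5) % width
--         c7 += row[j7] == '#'; j7 = (j7 + 7) % width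
--         if i % 2 == 0:
--             cd += row[jd] == '#'; jd = (jd + 1) % width
--     return c1 * c3 * c5 * c7 * cd
-- ===== Notes on version B (the rewrite author's own statement) =====
-- stated objective: alternative
-- what changed: A's five staged passes (an inner count_trees closure re-scanning the whole grid once per instruction, with the instruction list driving an outer product loop) are fused into a single pass over the rows that maintains all five (count, column) states simultaneously, multiplying the five counts at the end.
import Mathlib
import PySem

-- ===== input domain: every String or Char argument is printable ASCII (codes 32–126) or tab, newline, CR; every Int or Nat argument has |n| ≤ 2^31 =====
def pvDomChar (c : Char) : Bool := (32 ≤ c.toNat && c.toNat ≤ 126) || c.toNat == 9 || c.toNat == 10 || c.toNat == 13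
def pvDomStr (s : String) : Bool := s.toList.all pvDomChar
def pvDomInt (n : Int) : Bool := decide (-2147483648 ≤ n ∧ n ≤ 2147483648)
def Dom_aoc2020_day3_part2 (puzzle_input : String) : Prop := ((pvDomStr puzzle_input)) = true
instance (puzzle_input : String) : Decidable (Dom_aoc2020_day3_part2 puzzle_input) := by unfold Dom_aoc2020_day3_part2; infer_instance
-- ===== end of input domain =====

-- B fuses A's five staged passes (one count_trees scan per instruction) into a single pass over
-- the rows maintaining all five (count, column) states at once (objective: alternative).


-- ===== PORT A =====
-- inner helper count_trees: running column j, rows skipped via 'continue' when down == 2 and i % 2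
-- (the 'continue' precedes the j update, so j only advances on visited rows).
-- slope[0] is ported as pyGetD slope 0 []: split('\n') always returns a nonempty list, so exact;
-- row[j] is ported as pyGet? = some '#' (none = IndexError, those inputs are outside Pre_).
def pvA_countTrees (slope : List (List Char)) (right down : Int) : Int :=
  let l : Int := (PySem.List.pyGetD slope 0 []).length
  ((PySem.List.enumerate slope 0).foldl
    (fun (st : Int × Int) (p : Int × List Char) =>
      if down = 2 ∧ PySem.Int.mod p.1 2 ≠ 0 then st
      else
        ((if PySem.List.pyGet? p.2 st.2 = some '#' then st.1 + 1 else st.1),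
         PySem.Int.mod (st.2 + right) l))
    (0, 0)).1

def aoc2020_day3_part2 (puzzle_input : String) : Int :=
  let slope := PySem.Chars.splitOn puzzle_input.toList ['\n']
  let instructions : List (Int × Int) := [(1, 1), (3, 1), (5, 1), (7, 1), (1, 2)]
  instructions.foldl (fun mul rd => mul * pvA_countTrees slope rd.1 rd.2) 1

-- ===== PORT B =====
-- one statement 'c += row[j] == '#'; j = (j + right) % width' of Source B's fused loop body
def pvBrow (width : Int) (row : List Char) (st : Int × Int) (right : Int) : Int × Int :=
  ((if PySem.List.pyGet? row st.2 = some '#' then st.1 + 1 else st.1),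
   PySem.Int.mod (st.2 + right) width)

def aoc2020_day3_part2_alt (puzzle_input : String) : Int :=
  let slope := PySem.Chars.splitOn puzzle_input.toList ['\n']
  let width : Int := (PySem.List.pyGetD slope 0 []).length
  let fin := (PySem.List.enumerate slope 0).foldl
    (fun (st : (Int × Int) × (Int × Int) × (Int × Int) × (Int × Int) × (Int × Int))
         (p : Int × List Char) =>
      (pvBrow width p.2 st.1 1,
       pvBrow width p.2 st.2.1 3,
       pvBrow width p.2 st.2.2.1 5,
       pvBrow width p.2 st.2.2.2.1 7,
       if PySem.Int.mod p.1 2 = 0 then pvBrow width p.2 st.2.2.2.2 1 else st.2.2.2.2))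
    ((0, 0), (0, 0), (0, 0), (0, 0), (0, 0))
  fin.1.1 * fin.2.1.1 * fin.2.2.1.1 * fin.2.2.2.1.1 * fin.2.2.2.2.1

-- ===== PRECONDITION & SPEC =====
-- Pre_ holds exactly when every cell the toboggan visits lies inside its (possibly ragged) row:
-- for every row i, column (i*r) % width is in range for each right step r ∈ {1,3,5,7}, and on even
-- rows column (i/2) % width is in range (the down = 2 slope).  Outside Pre_ the Python A raises
-- IndexError (or, when the first line is empty, ZeroDivisionError in B): no value is claimed there.
def Pre_aoc2020_day3_part2 (puzzle_input : String) : Prop :=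
  let rows := PySem.Chars.splitOn puzzle_input.toList ['\n']
  let l := (rows.headD []).length
  ∀ i < rows.length,
    (∀ r ∈ [1, 3, 5, 7], (i * r) % l < (rows.getD i []).length) ∧
    (i % 2 = 0 → (i / 2) % l < (rows.getD i []).length)
instance (puzzle_input : String) : Decidable (Pre_aoc2020_day3_part2 puzzle_input) := by
  unfold Pre_aoc2020_day3_part2; infer_instance

def pvWitness_aoc2020_day3_part2 : String := "..#\n#..\n.#."

def Spec_aoc2020_day3_part2 (puzzle_input : String) (out : Int) : Prop := out = aoc2020_day3_part2_alt puzzle_input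
instance (puzzle_input : String) (out : Int) : Decidable (Spec_aoc2020_day3_part2 puzzle_input out) := by unfold Spec_aoc2020_day3_part2; infer_instance

-- ===== CLAIM (what is proved, stated in full; the proofs are below) =====
def Claim_equal_aoc2020_day3_part2 : Prop := ∀ (puzzle_input : String), Dom_aoc2020_day3_part2 puzzle_input → Pre_aoc2020_day3_part2 puzzle_input → Spec_aoc2020_day3_part2 puzzle_input (aoc2020_day3_part2 puzzle_input)

-- ===== LEMMAS AND PROOFS =====

-- named step functions (definitionally the per-row steps of both ports)
def pvStep1 (l right : Int) (st : Int × Int) (p : Int × List Char) : Int × Int :=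
  pvBrow l p.2 st right

def pvStep2 (l : Int) (st : Int × Int) (p : Int × List Char) : Int × Int :=
  if PySem.Int.mod p.1 2 ≠ 0 then st else pvBrow l p.2 st 1

lemma pvAstep1_eq (right l : Int) :
    (fun (st : Int × Int) (p : Int × List Char) =>
      if (1 : Int) = 2 ∧ PySem.Int.mod p.1 2 ≠ 0 then st
      else
        ((if PySem.List.pyGet? p.2 st.2 = some '#' then st.1 + 1 else st.1),
         PySem.Int.mod (st.2 + right) l))
    = pvStep1 l right := by
  funext st p; simp [pvStep1, pvBrow]

lemma pvAstep2_eq (l : Int) :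
    (fun (st : Int × Int) (p : Int × List Char) =>
      if True ∧ PySem.Int.mod p.1 2 ≠ 0 then st
      else
        ((if PySem.List.pyGet? p.2 st.2 = some '#' then st.1 + 1 else st.1),
         PySem.Int.mod (st.2 + 1) l))
    = pvStep2 l := by
  funext st p; simp [pvStep2, pvBrow]

lemma pvA1 (slope : List (List Char)) (r : Int) :
    pvA_countTrees slope r 1
    = ((PySem.List.enumerate slope 0).foldl
        (pvStep1 ((PySem.List.pyGetD slope 0 []).length : Int) r) (0, 0)).1 := by
  simp only [pvA_countTrees]
  rw [pvAstep1_eq]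

lemma pvA2 (slope : List (List Char)) :
    pvA_countTrees slope 1 2
    = ((PySem.List.enumerate slope 0).foldl
        (pvStep2 ((PySem.List.pyGetD slope 0 []).length : Int)) (0, 0)).1 := by
  simp only [pvA_countTrees]
  rw [pvAstep2_eq]

-- the fused fold computes, componentwise, exactly the five separate folds
lemma pvFuse (l : Int) (rows : List (List Char)) : ∀ (i0 : Int)
    (s1 s3 s5 s7 sd : Int × Int),
    (PySem.List.enumerate rows i0).foldl
      (fun (st : (Int × Int) × (Int × Int) × (Int × Int) × (Int × Int) × (Int × Int))
           (p : Int × List Char) =>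
        (pvBrow l p.2 st.1 1,
         pvBrow l p.2 st.2.1 3,
         pvBrow l p.2 st.2.2.1 5,
         pvBrow l p.2 st.2.2.2.1 7,
         if PySem.Int.mod p.1 2 = 0 then pvBrow l p.2 st.2.2.2.2 1 else st.2.2.2.2))
      (s1, s3, s5, s7, sd)
    = ((PySem.List.enumerate rows i0).foldl (pvStep1 l 1) s1,
       (PySem.List.enumerate rows i0).foldl (pvStep1 l 3) s3,
       (PySem.List.enumerate rows i0).foldl (pvStep1 l 5) s5,
       (PySem.List.enumerate rows i0).foldl (pvStep1 l 7) s7,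
       (PySem.List.enumerate rows i0).foldl (pvStep2 l) sd) := by
  induction rows with
  | nil => intro i0 s1 s3 s5 s7 sd; simp [PySem.List.enumerate_nil]
  | cons r rs ih =>
      intro i0 s1 s3 s5 s7 sd
      rw [PySem.List.enumerate_cons]
      simp only [List.foldl_cons]
      rw [ih (i0 + 1)]
      by_cases h : PySem.Int.mod i0 2 = 0 <;>
        simp only [pvStep1, pvStep2, h, ne_eq, not_true_eq_false, not_false_eq_true,
          if_true, if_false]

lemma pvAltEq (s : String) :
    aoc2020_day3_part2_alt s
    = (let slope := PySem.Chars.splitOn s.toList ['\n']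
       let l : Int := (PySem.List.pyGetD slope 0 []).length
       ((PySem.List.enumerate slope 0).foldl (pvStep1 l 1) (0, 0)).1 *
       ((PySem.List.enumerate slope 0).foldl (pvStep1 l 3) (0, 0)).1 *
       ((PySem.List.enumerate slope 0).foldl (pvStep1 l 5) (0, 0)).1 *
       ((PySem.List.enumerate slope 0).foldl (pvStep1 l 7) (0, 0)).1 *
       ((PySem.List.enumerate slope 0).foldl (pvStep2 l) (0, 0)).1) := by
  simp only [aoc2020_day3_part2_alt]
  rw [pvFuse]

-- ===== VERDICT (by name: the statement is the Claim_ definition above) =====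
theorem aoc2020_day3_part2_spec : Claim_equal_aoc2020_day3_part2 := by
  intro s _ _
  unfold Spec_aoc2020_day3_part2
  rw [pvAltEq]
  simp only [aoc2020_day3_part2, List.foldl_cons, List.foldl_nil]
  rw [pvA1, pvA1, pvA1, pvA1, pvA2]
  ring
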